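-- pv_equiv track=rewrite | github.com/elazarg/stratlet | lean-defs.py | strip_proof
-- ===== SOURCE A (Python) =====
-- def find_toplevel_assign(text):
--     """Find ':=' at bracket depth 0 in text.
--
--     Returns the index of ':' in ':=', or -1 if not found.
--     """
--     depth = 0
--     i = 0
--     n = len(text)
--     # Track whether we're inside a string literal
--     in_string = False
--     while i < n:
--         c = text[i]
--         if c == '"' and (i == 0 or text[i-1] != '\\'):
--             in_string = not in_string
--             i += 1
--             continue
--         if in_string:
--             i += 1
--             continue
--         if c in "([{":
--             depth += 1
--         elif c in ")]}":
--             depth = max(0, depth - 1)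
--         elif c == ":" and i + 1 < n and text[i + 1] == "=" and depth == 0:
--             # Make sure it's not inside a comment
--             return i
--         elif c == "-" and i + 1 < n and text[i + 1] == "-":
--             # Line comment — skip to end of line
--             nl = text.find("\n", i)
--             if nl == -1:
--                 return -1
--             i = nl + 1
--             continue
--         elif c == "/" and i + 1 < n and text[i + 1] == "-":
--             # Block comment — skip (respecting nesting)
--             comment_depth = 1
--             i += 2
--             while i < n - 1 and comment_depth > 0:
--                 if text[i] == "/" and text[i + 1] == "-":
--                     comment_depth += 1
--                     i += 2
--                 elif text[i] == "-" and text[i + 1] == "/":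
--                     comment_depth -= 1
--                     i += 2
--                 else:
--                     i += 1
--             continue
--         i += 1
--     return -1
--
-- def strip_proof(block_lines):
--     """Strip proof body from theorem/lemma block. Keep up to before ':='."""
--     text = "\n".join(block_lines)
--     pos = find_toplevel_assign(text)
--     if pos == -1:
--         # No ':=' found — look for 'where' on its own line
--         for i, line in enumerate(block_lines):
--             if line.strip() == "where":
--                 return block_lines[:i]
--         # No stripping possible, keep as-is
--         return block_lines
--     # Keep everything before ':='
--     before = text[:pos].rstrip()
--     return before.split("\n")
-- ===== SOURCE B (Python) =====
-- def _find_toplevel_assign_sm(text):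
--     """Character-by-character state machine: NORMAL / STRING / LINE / BLOCK,
--     with a bracket depth, a block-comment nesting counter, the previous raw
--     character, and a one-character pending lookbehind for the two-char tokens."""
--     NORMAL, STRING, LINE, BLOCK = 0, 1, 2, 3
--     mode = NORMAL
--     depth = 0
--     nest = 0
--     pend = None   # previous char if it may start ':=' / '--' / '/-' (or '/-' / '-/' in BLOCK) and was not consumed
--     prev = None   # previous raw char (for the escaped-quote check)
--     for i, c in enumerate(text):
--         if mode == NORMAL:
--             if c == '"' and prev != '\\':
--                 mode = STRING
--                 pend = None
--             elif pend == ':' and c == '=' and depth == 0: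
--                 return i - 1
--             elif pend == '-' and c == '-':
--                 mode = LINE
--                 pend = None
--             elif pend == '/' and c == '-':
--                 mode = BLOCK
--                 nest = 1
--                 pend = None
--             else:
--                 if c in '([{':
--                     depth += 1
--                 elif c in ')]}':
--                     depth = max(0, depth - 1)
--                 pend = c if c in ':-/' else None
--         elif mode == STRING:
--             if c == '"' and prev != '\\':
--                 mode = NORMAL
--         elif mode == LINE:
--             if c == '\n':
--                 mode = NORMAL
--         else:  # BLOCK
--             if pend == '/' and c == '-':
--                 nest += 1
--                 pend = None
--             elif pend == '-' and c == '/':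
--                 nest -= 1
--                 pend = None
--                 if nest == 0:
--                     mode = NORMAL
--             else:
--                 pend = c if c in '/-' else None
--         prev = c
--     return -1
--
-- def strip_proof(block_lines):
--     """Strip proof body from theorem/lemma block. Keep up to before ':='."""
--     text = "\n".join(block_lines)
--     pos = _find_toplevel_assign_sm(text)
--     if pos == -1:
--         for i, line in enumerate(block_lines):
--             if line.strip() == "where":
--                 return block_lines[:i]
--         return block_lines
--     before = text[:pos].rstrip()
--     return before.split("\n")
-- ===== Notes on version B (the rewrite author's own statement) =====
-- stated objective: alternative
-- what changed: The top-level ':=' finder is rewritten from A's index-jumping scanner (lookahead pairs, str.find jump over line comments, an inner while loop for nested block comments) into a single character-by-character state machine (NORMAL/STRING/LINE/BLOCK with a nesting counter and a one-character pending lookbehind) that advances exactly one character per step.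
import Mathlib
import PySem

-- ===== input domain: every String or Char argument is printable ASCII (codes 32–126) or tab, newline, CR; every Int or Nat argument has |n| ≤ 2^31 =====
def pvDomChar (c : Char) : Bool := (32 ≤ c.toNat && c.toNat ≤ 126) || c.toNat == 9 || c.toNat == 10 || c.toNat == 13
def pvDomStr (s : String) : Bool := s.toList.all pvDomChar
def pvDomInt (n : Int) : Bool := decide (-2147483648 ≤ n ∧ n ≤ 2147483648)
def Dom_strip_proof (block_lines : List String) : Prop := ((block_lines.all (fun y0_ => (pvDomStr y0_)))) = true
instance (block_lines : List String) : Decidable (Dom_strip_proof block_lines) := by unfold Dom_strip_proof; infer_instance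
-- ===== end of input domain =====

-- B replaces A's index-jumping scanner (find/inner-while skips) for the top-level ':=' by a
-- one-character-at-a-time state machine (NORMAL/STRING/LINE/BLOCK with a pending-lookbehind char);
-- objective: alternative structure, same exact result (full equivalence, no precondition).

-- ===== PORT A =====

-- text.find("\n", i)  (returns the index, as an Option instead of -1; used only for the jump).
-- fuel only makes the recursion structural; text.length + 1 is always enough (i grows each step)
def pvFindNl (text : List Char) : Nat → Nat → Option Nat
  | 0, _ => none
  | fuel + 1, i =>
    if i < text.length then
      if text.getD i ' ' = '\n' then some i else pvFindNl text fuel (i + 1)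
    else none

-- A's inner block-comment loop: state (i, comment_depth)
def pvBlock (text : List Char) : Nat → Nat → Nat → Nat × Nat
  | 0, i, cd => (i, cd)
  | fuel + 1, i, cd =>
    if i < text.length - 1 ∧ 0 < cd then
      if text.getD i ' ' = '/' ∧ text.getD (i + 1) ' ' = '-' then pvBlock text fuel (i + 2) (cd + 1)
      else if text.getD i ' ' = '-' ∧ text.getD (i + 1) ' ' = '/' then pvBlock text fuel (i + 2) (cd - 1)
      else pvBlock text fuel (i + 1) cd
    else (i, cd)

-- A's outer while loop
def pvFtaLoop (text : List Char) : Nat → Nat → Nat → Bool → Int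
  | 0, _, _, _ => -1
  | fuel + 1, i, depth, instr =>
    if i < text.length then
      -- c := text[i]  (inlined)
      if text.getD i ' ' = '"' ∧ (i = 0 ∨ text.getD (i - 1) ' ' ≠ '\\') then pvFtaLoop text fuel (i + 1) depth (!instr)
      else if instr then pvFtaLoop text fuel (i + 1) depth instr
      else if text.getD i ' ' = '(' ∨ text.getD i ' ' = '[' ∨ text.getD i ' ' = '{' then pvFtaLoop text fuel (i + 1) (depth + 1) instr
      else if text.getD i ' ' = ')' ∨ text.getD i ' ' = ']' ∨ text.getD i ' ' = '}' then pvFtaLoop text fuel (i + 1) (depth - 1) instr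
      else if text.getD i ' ' = ':' ∧ i + 1 < text.length ∧ text.getD (i + 1) ' ' = '=' ∧ depth = 0 then (i : Int)
      else if text.getD i ' ' = '-' ∧ i + 1 < text.length ∧ text.getD (i + 1) ' ' = '-' then
        match pvFindNl text (text.length + 1) i with
        | none => -1
        | some nl => pvFtaLoop text fuel (nl + 1) depth instr
      else if text.getD i ' ' = '/' ∧ i + 1 < text.length ∧ text.getD (i + 1) ' ' = '-' then
        pvFtaLoop text fuel (pvBlock text (text.length + 1) (i + 2) 1).1 depth instr
      else pvFtaLoop text fuel (i + 1) depth instr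
    else -1

def find_toplevel_assign (text : List Char) : Int := pvFtaLoop text (text.length + 1) 0 0 false

-- A's 'for i, line in enumerate(block_lines): if line.strip() == "where": return block_lines[:i]'
def pvWhereScan (block_lines : List String) : List (Int × String) → List String
  | [] => block_lines
  | (i, line) :: rest =>
      if PySem.Str.strip line = "where" then block_lines.take i.toNat
      else pvWhereScan block_lines rest

def strip_proof (block_lines : List String) : List String :=
  let text := PySem.Str.join "\n" block_lines
  let pos := find_toplevel_assign text.toList
  if pos = -1 then
    pvWhereScan block_lines (PySem.List.enumerate block_lines)
  else
    let before := PySem.Str.rstrip (PySem.Str.slice text none (some pos))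
    match PySem.Str.split? before "\n" with   -- sep "\n" ≠ "": split? never returns none
    | some parts => parts
    | none => []

-- ===== PORT B =====

inductive PvMode | norm | str | line | blok
deriving DecidableEq, Repr

-- B's state machine over the characters (i is the current index, pend the unconsumed
-- previous char relevant to the two-char tokens, prev the previous raw char)
def pvFtaSM (cs : List Char) (i : Nat) (m : PvMode) (depth nest : Nat)
    (pend prev : Option Char) : Int :=
  match cs with
  | [] => -1
  | c :: rest =>
    match m with
    | .norm =>
      if c = '"' ∧ prev ≠ some '\\' then pvFtaSM rest (i + 1) .str depth nest none (some c)
      else if pend = some ':' ∧ c = '=' ∧ depth = 0 then (i : Int) - 1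
      else if pend = some '-' ∧ c = '-' then pvFtaSM rest (i + 1) .line depth nest none (some c)
      else if pend = some '/' ∧ c = '-' then pvFtaSM rest (i + 1) .blok depth 1 none (some c)
      else
        let depth' := if c = '(' ∨ c = '[' ∨ c = '{' then depth + 1
                      else if c = ')' ∨ c = ']' ∨ c = '}' then depth - 1 else depth
        let pend' := if c = ':' ∨ c = '-' ∨ c = '/' then some c else none
        pvFtaSM rest (i + 1) .norm depth' nest pend' (some c)
    | .str =>
      if c = '"' ∧ prev ≠ some '\\' then pvFtaSM rest (i + 1) .norm depth nest pend (some c)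
      else pvFtaSM rest (i + 1) .str depth nest pend (some c)
    | .line =>
      if c = '\n' then pvFtaSM rest (i + 1) .norm depth nest pend (some c)
      else pvFtaSM rest (i + 1) .line depth nest pend (some c)
    | .blok =>
      if pend = some '/' ∧ c = '-' then pvFtaSM rest (i + 1) .blok depth (nest + 1) none (some c)
      else if pend = some '-' ∧ c = '/' then
        if nest - 1 = 0 then pvFtaSM rest (i + 1) .norm depth (nest - 1) none (some c)
        else pvFtaSM rest (i + 1) .blok depth (nest - 1) none (some c)
      else
        let pend' := if c = '/' ∨ c = '-' then some c else none
        pvFtaSM rest (i + 1) .blok depth nest pend' (some c)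

def find_toplevel_assign_alt (text : List Char) : Int := pvFtaSM text 0 .norm 0 0 none none

def strip_proof_alt (block_lines : List String) : List String :=
  let text := PySem.Str.join "\n" block_lines
  let pos := find_toplevel_assign_alt text.toList
  if pos = -1 then
    pvWhereScan block_lines (PySem.List.enumerate block_lines)
  else
    let before := PySem.Str.rstrip (PySem.Str.slice text none (some pos))
    match PySem.Str.split? before "\n" with
    | some parts => parts
    | none => []

-- ===== PRECONDITION & SPEC =====
def Spec_strip_proof (block_lines : List String) (out : List String) : Prop := out = strip_proof_alt block_lines
instance (block_lines : List String) (out : List String) : Decidable (Spec_strip_proof block_lines out) := by unfold Spec_strip_proof; infer_instance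

-- ===== CLAIM (what is proved, stated in full; the proofs are below) =====
def Claim_equal_strip_proof : Prop := ∀ (block_lines : List String), Dom_strip_proof block_lines → Spec_strip_proof block_lines (strip_proof block_lines)

-- ===== LEMMAS AND PROOFS =====

-- previous raw character seen by the machine when it is at index i
def pvPrevOf (text : List Char) (i : Nat) : Option Char :=
  if i = 0 then none else some (text.getD (i - 1) ' ')

theorem pvPrevOf_succ (text : List Char) (i : Nat) :
    pvPrevOf text (i + 1) = some (text.getD i ' ') := by simp [pvPrevOf]

theorem pvDropCons {text : List Char} {j : Nat} (h : j < text.length) :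
    text.drop j = text.getD j ' ' :: text.drop (j + 1) := by
  rw [List.drop_eq_getElem_cons h]
  congr 1
  simp [List.getD_eq_getElem?_getD, List.getElem?_eq_getElem h]

-- interface lemmas for the fuel-based A-side loops: with fuel text.length + 1 the fuel
-- never runs out (the index grows at every step), so the usual unfold equations hold

theorem pvFindNl_ge {text : List Char} {f i nl : Nat} (h : pvFindNl text f i = some nl) :
    i ≤ nl ∧ nl < text.length ∧ text.getD nl ' ' = '\n' := by
  induction f generalizing i with
  | zero => simp [pvFindNl] at h
  | succ f ih =>
    rw [pvFindNl] at h
    by_cases hi : i < text.length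
    · rw [if_pos hi] at h
      by_cases hc : text.getD i ' ' = '\n'
      · rw [if_pos hc] at h
        injection h with h2
        subst h2
        exact ⟨le_refl _, hi, hc⟩
      · rw [if_neg hc] at h
        have := ih h
        exact ⟨by omega, this.2⟩
    · rw [if_neg hi] at h
      cases h

theorem pvFindNl_fuelirr (text : List Char) : ∀ f g i, text.length < f + i →
    text.length < g + i → pvFindNl text f i = pvFindNl text g i := by
  intro f
  induction f with
  | zero =>
    intro g i h1 h2
    cases g with
    | zero => rfl
    | succ g => simp [pvFindNl, show ¬ i < text.length by omega]
  | succ f ih =>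
    intro g i h1 h2
    cases g with
    | zero => simp [pvFindNl, show ¬ i < text.length by omega]
    | succ g =>
      simp only [pvFindNl]
      by_cases hi : i < text.length
      · simp only [if_pos hi]
        by_cases hc : text.getD i ' ' = '\n'
        · rw [if_pos hc, if_pos hc]
        · rw [if_neg hc, if_neg hc]
          exact ih g (i + 1) (by omega) (by omega)
      · rw [if_neg hi, if_neg hi]

theorem pvFindNl_none (text : List Char) (i : Nat) (h : ¬ i < text.length) :
    pvFindNl text (text.length + 1) i = none := by
  rw [pvFindNl, if_neg h]

theorem pvFindNl_hit (text : List Char) (i : Nat) (hi : i < text.length)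
    (hc : text.getD i ' ' = '\n') : pvFindNl text (text.length + 1) i = some i := by
  rw [pvFindNl, if_pos hi, if_pos hc]

theorem pvFindNl_step (text : List Char) (i : Nat) (hi : i < text.length)
    (hc : text.getD i ' ' ≠ '\n') :
    pvFindNl text (text.length + 1) i = pvFindNl text (text.length + 1) (i + 1) := by
  conv_lhs => rw [pvFindNl]
  rw [if_pos hi, if_neg hc]
  exact pvFindNl_fuelirr text text.length (text.length + 1) (i + 1) (by omega) (by omega)

theorem pvBlock_ge (text : List Char) : ∀ f i cd, i ≤ (pvBlock text f i cd).1 := by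
  intro f
  induction f with
  | zero => intro i cd; simp [pvBlock]
  | succ f ih =>
    intro i cd
    rw [pvBlock]
    split_ifs with h1 h2 h3
    · exact le_trans (by omega) (ih (i + 2) (cd + 1))
    · exact le_trans (by omega) (ih (i + 2) (cd - 1))
    · exact le_trans (by omega) (ih (i + 1) cd)
    · simp

theorem pvBlock_fuelirr (text : List Char) : ∀ f g i cd, text.length < f + i →
    text.length < g + i → pvBlock text f i cd = pvBlock text g i cd := by
  intro f
  induction f with
  | zero =>
    intro g i cd h1 h2
    cases g with
    | zero => rfl
    | succ g => simp [pvBlock, show ¬ i < text.length - 1 by omega]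
  | succ f ih =>
    intro g i cd h1 h2
    cases g with
    | zero => simp [pvBlock, show ¬ i < text.length - 1 by omega]
    | succ g =>
      simp only [pvBlock]
      by_cases hg : i < text.length - 1 ∧ 0 < cd
      · simp only [if_pos hg]
        by_cases hp : text.getD i ' ' = '/' ∧ text.getD (i + 1) ' ' = '-'
        · rw [if_pos hp, if_pos hp]
          exact ih g (i + 2) (cd + 1) (by omega) (by omega)
        · rw [if_neg hp, if_neg hp]
          by_cases hm : text.getD i ' ' = '-' ∧ text.getD (i + 1) ' ' = '/'
          · rw [if_pos hm, if_pos hm]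
            exact ih g (i + 2) (cd - 1) (by omega) (by omega)
          · rw [if_neg hm, if_neg hm]
            exact ih g (i + 1) cd (by omega) (by omega)
      · rw [if_neg hg, if_neg hg]

theorem pvBlock_exit (text : List Char) (i cd : Nat) (h : ¬ (i < text.length - 1 ∧ 0 < cd)) :
    pvBlock text (text.length + 1) i cd = (i, cd) := by
  rw [pvBlock, if_neg h]

theorem pvBlock_inc (text : List Char) (i cd : Nat) (hg : i < text.length - 1 ∧ 0 < cd)
    (hp : text.getD i ' ' = '/' ∧ text.getD (i + 1) ' ' = '-') :
    pvBlock text (text.length + 1) i cd = pvBlock text (text.length + 1) (i + 2) (cd + 1) := by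
  conv_lhs => rw [pvBlock]
  rw [if_pos hg, if_pos hp]
  exact pvBlock_fuelirr text text.length (text.length + 1) (i + 2) (cd + 1) (by omega) (by omega)

theorem pvBlock_dec (text : List Char) (i cd : Nat) (hg : i < text.length - 1 ∧ 0 < cd)
    (hp : ¬ (text.getD i ' ' = '/' ∧ text.getD (i + 1) ' ' = '-'))
    (hm : text.getD i ' ' = '-' ∧ text.getD (i + 1) ' ' = '/') :
    pvBlock text (text.length + 1) i cd = pvBlock text (text.length + 1) (i + 2) (cd - 1) := by
  conv_lhs => rw [pvBlock]
  rw [if_pos hg, if_neg hp, if_pos hm]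
  exact pvBlock_fuelirr text text.length (text.length + 1) (i + 2) (cd - 1) (by omega) (by omega)

theorem pvBlock_skip (text : List Char) (i cd : Nat) (hg : i < text.length - 1 ∧ 0 < cd)
    (hp : ¬ (text.getD i ' ' = '/' ∧ text.getD (i + 1) ' ' = '-'))
    (hm : ¬ (text.getD i ' ' = '-' ∧ text.getD (i + 1) ' ' = '/')) :
    pvBlock text (text.length + 1) i cd = pvBlock text (text.length + 1) (i + 1) cd := by
  conv_lhs => rw [pvBlock]
  rw [if_pos hg, if_neg hp, if_neg hm]
  exact pvBlock_fuelirr text text.length (text.length + 1) (i + 1) cd (by omega) (by omega)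

-- if A's inner comment loop exits with the comment still open, it stopped at the last char
theorem pvBlockExit (text : List Char) : ∀ f i cd, text.length < f + i →
    (pvBlock text f i cd).2 ≠ 0 → text.length - 1 ≤ (pvBlock text f i cd).1 := by
  intro f
  induction f with
  | zero =>
    intro i cd h1 h2
    simp only [pvBlock]
    omega
  | succ f ih =>
    intro i cd h1 h2
    rw [pvBlock] at h2 ⊢
    by_cases hg : i < text.length - 1 ∧ 0 < cd
    · rw [if_pos hg] at h2 ⊢
      by_cases hp : text.getD i ' ' = '/' ∧ text.getD (i + 1) ' ' = '-'
      · rw [if_pos hp] at h2 ⊢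
        exact ih (i + 2) (cd + 1) (by omega) h2
      · rw [if_neg hp] at h2 ⊢
        by_cases hm : text.getD i ' ' = '-' ∧ text.getD (i + 1) ' ' = '/'
        · rw [if_pos hm] at h2 ⊢
          exact ih (i + 2) (cd - 1) (by omega) h2
        · rw [if_neg hm] at h2 ⊢
          exact ih (i + 1) cd (by omega) h2
    · rw [if_neg hg] at h2 ⊢
      omega

theorem pvLoopEnd (text : List Char) (m depth : Nat) (instr : Bool)
    (h : text.length ≤ m) : pvFtaLoop text (text.length + 1) m depth instr = -1 := by
  rw [pvFtaLoop, if_neg (by omega)]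

theorem pvLoop_fuelirr (text : List Char) : ∀ f g i d instr, text.length < f + i →
    text.length < g + i → pvFtaLoop text f i d instr = pvFtaLoop text g i d instr := by
  intro f
  induction f with
  | zero =>
    intro g i d instr h1 h2
    cases g with
    | zero => rfl
    | succ g => simp [pvFtaLoop, show ¬ i < text.length by omega]
  | succ f ih =>
    intro g i d instr h1 h2
    cases g with
    | zero => simp [pvFtaLoop, show ¬ i < text.length by omega]
    | succ g =>
      simp only [pvFtaLoop]
      by_cases hi : i < text.length
      · simp only [if_pos hi]
        by_cases hq : text.getD i ' ' = '"' ∧ (i = 0 ∨ text.getD (i - 1) ' ' ≠ '\\')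
        · rw [if_pos hq, if_pos hq]
          exact ih g (i + 1) d (!instr) (by omega) (by omega)
        · rw [if_neg hq, if_neg hq]
          cases instr
          case neg.false =>
            simp only [Bool.false_eq_true, if_false]
            by_cases ho : text.getD i ' ' = '(' ∨ text.getD i ' ' = '[' ∨ text.getD i ' ' = '{'
            · rw [if_pos ho, if_pos ho]
              exact ih g (i + 1) (d + 1) false (by omega) (by omega)
            · rw [if_neg ho, if_neg ho]
              by_cases hcl : text.getD i ' ' = ')' ∨ text.getD i ' ' = ']' ∨ text.getD i ' ' = '}'
              · rw [if_pos hcl, if_pos hcl]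
                exact ih g (i + 1) (d - 1) false (by omega) (by omega)
              · rw [if_neg hcl, if_neg hcl]
                by_cases hcn : text.getD i ' ' = ':' ∧ i + 1 < text.length ∧ text.getD (i + 1) ' ' = '=' ∧ d = 0
                · rw [if_pos hcn, if_pos hcn]
                · rw [if_neg hcn, if_neg hcn]
                  by_cases hln : text.getD i ' ' = '-' ∧ i + 1 < text.length ∧ text.getD (i + 1) ' ' = '-'
                  · rw [if_pos hln, if_pos hln]
                    cases hnl : pvFindNl text (text.length + 1) i with
                    | none => rfl
                    | some nl =>
                      have := pvFindNl_ge hnl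
                      exact ih g (nl + 1) d false (by omega) (by omega)
                  · rw [if_neg hln, if_neg hln]
                    by_cases hbn : text.getD i ' ' = '/' ∧ i + 1 < text.length ∧ text.getD (i + 1) ' ' = '-'
                    · rw [if_pos hbn, if_pos hbn]
                      have := pvBlock_ge text (text.length + 1) (i + 2) 1
                      exact ih g (pvBlock text (text.length + 1) (i + 2) 1).1 d false (by omega) (by omega)
                    · rw [if_neg hbn, if_neg hbn]
                      exact ih g (i + 1) d false (by omega) (by omega)
          case neg.true =>
            rw [if_pos rfl, if_pos rfl]
            exact ih g (i + 1) d true (by omega) (by omega)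
      · rw [if_neg hi, if_neg hi]

-- the one-step unfolding of A's loop, with every recursive call back at full fuel
theorem pvLoopU (text : List Char) (i depth : Nat) (instr : Bool) (hi : i < text.length) :
    pvFtaLoop text (text.length + 1) i depth instr =
      (if text.getD i ' ' = '"' ∧ (i = 0 ∨ text.getD (i - 1) ' ' ≠ '\\') then pvFtaLoop text (text.length + 1) (i + 1) depth (!instr)
       else if instr then pvFtaLoop text (text.length + 1) (i + 1) depth instr
       else if text.getD i ' ' = '(' ∨ text.getD i ' ' = '[' ∨ text.getD i ' ' = '{' then pvFtaLoop text (text.length + 1) (i + 1) (depth + 1) instr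
       else if text.getD i ' ' = ')' ∨ text.getD i ' ' = ']' ∨ text.getD i ' ' = '}' then pvFtaLoop text (text.length + 1) (i + 1) (depth - 1) instr
       else if text.getD i ' ' = ':' ∧ i + 1 < text.length ∧ text.getD (i + 1) ' ' = '=' ∧ depth = 0 then (i : Int)
       else if text.getD i ' ' = '-' ∧ i + 1 < text.length ∧ text.getD (i + 1) ' ' = '-' then
         match pvFindNl text (text.length + 1) i with
         | none => -1
         | some nl => pvFtaLoop text (text.length + 1) (nl + 1) depth instr
       else if text.getD i ' ' = '/' ∧ i + 1 < text.length ∧ text.getD (i + 1) ' ' = '-' then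
         pvFtaLoop text (text.length + 1) (pvBlock text (text.length + 1) (i + 2) 1).1 depth instr
       else pvFtaLoop text (text.length + 1) (i + 1) depth instr) := by
  conv_lhs => rw [pvFtaLoop]
  rw [if_pos hi]
  split_ifs
  · exact pvLoop_fuelirr text text.length (text.length + 1) (i + 1) depth (!instr) (by omega) (by omega)
  · exact pvLoop_fuelirr text text.length (text.length + 1) (i + 1) depth instr (by omega) (by omega)
  · exact pvLoop_fuelirr text text.length (text.length + 1) (i + 1) (depth + 1) instr (by omega) (by omega)
  · exact pvLoop_fuelirr text text.length (text.length + 1) (i + 1) (depth - 1) instr (by omega) (by omega)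
  · rfl
  · cases hnl : pvFindNl text (text.length + 1) i with
    | none => rfl
    | some nl => exact pvLoop_fuelirr text text.length (text.length + 1) (nl + 1) depth instr (by omega) (by omega)
  · have := pvBlock_ge text (text.length + 1) (i + 2) 1
    exact pvLoop_fuelirr text text.length (text.length + 1) (pvBlock text (text.length + 1) (i + 2) 1).1 depth instr (by omega) (by omega)
  · exact pvLoop_fuelirr text text.length (text.length + 1) (i + 1) depth instr (by omega) (by omega)

-- a pending char whose token cannot fire at the head is the same as no pending char (NORMAL)
theorem pvCollapseNorm (cs : List Char) (i depth nest : Nat) (p : Char) (prev : Option Char)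
    (h : ∀ c rest, cs = c :: rest →
      ¬(p = ':' ∧ c = '=' ∧ depth = 0) ∧ ¬(p = '-' ∧ c = '-') ∧ ¬(p = '/' ∧ c = '-')) :
    pvFtaSM cs i .norm depth nest (some p) prev = pvFtaSM cs i .norm depth nest none prev := by
  cases cs with
  | nil => rfl
  | cons c rest =>
    obtain ⟨h1, h2, h3⟩ := h c rest rfl
    simp only [pvFtaSM, Option.some.injEq]
    by_cases hq : c = '"' ∧ prev ≠ some '\\'
    · simp [hq]
    · have n1 : ¬((none : Option Char) = some ':' ∧ c = '=' ∧ depth = 0) := by simp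
      have n2 : ¬((none : Option Char) = some '-' ∧ c = '-') := by simp
      have n3 : ¬((none : Option Char) = some '/' ∧ c = '-') := by simp
      rw [if_neg hq, if_neg hq, if_neg h1, if_neg h2, if_neg h3, if_neg n1, if_neg n2, if_neg n3]

-- same, in a block comment
theorem pvCollapseBlok (cs : List Char) (i depth nest : Nat) (p : Char) (prev : Option Char)
    (h : ∀ c rest, cs = c :: rest → ¬(p = '/' ∧ c = '-') ∧ ¬(p = '-' ∧ c = '/')) :
    pvFtaSM cs i .blok depth nest (some p) prev = pvFtaSM cs i .blok depth nest none prev := by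
  cases cs with
  | nil => rfl
  | cons c rest =>
    obtain ⟨h1, h2⟩ := h c rest rfl
    simp only [pvFtaSM, Option.some.injEq]
    have n1 : ¬((none : Option Char) = some '/' ∧ c = '-') := by simp
    have n2 : ¬((none : Option Char) = some '-' ∧ c = '/') := by simp
    rw [if_neg h1, if_neg h2, if_neg n1, if_neg n2]

-- the machine in LINE mode = A's jump to just after the next newline
theorem pvLineSim (text : List Char) (k : Nat) : ∀ j depth nest prev, text.length - j ≤ k →
    pvFtaSM (text.drop j) j .line depth nest none prev =
      (match pvFindNl text (text.length + 1) j with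
       | none => -1
       | some nl => pvFtaSM (text.drop (nl + 1)) (nl + 1) .norm depth nest none (some '\n')) := by
  induction k with
  | zero =>
    intro j d nest prev hk
    have hj : text.length ≤ j := by omega
    rw [List.drop_eq_nil_of_le hj, pvFindNl_none text j (by omega)]
    rfl
  | succ k ih =>
    intro j d nest prev hk
    by_cases hj : j < text.length
    · rw [pvDropCons hj]
      by_cases hc : text.getD j ' ' = '\n'
      · rw [pvFindNl_hit text j hj hc]
        simp only [pvFtaSM]
        rw [if_pos hc, hc]
      · rw [pvFindNl_step text j hj hc]
        simp only [pvFtaSM, if_neg hc]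
        exact ih (j + 1) d nest _ (by omega)
    · rw [List.drop_eq_nil_of_le (by omega), pvFindNl_none text j (by omega)]
      rfl

-- A's loop from n-1 (or past the end) finds nothing
theorem pvLast (text : List Char) (j depth : Nat) (instr : Bool)
    (hj : text.length - 1 ≤ j) : pvFtaLoop text (text.length + 1) j depth instr = -1 := by
  by_cases hjn : j < text.length
  · have hj1 : ¬ (j + 1 < text.length) := by omega
    have hE : ∀ (d : Nat) (b : Bool), pvFtaLoop text (text.length + 1) (j + 1) d b = -1 :=
      fun d b => pvLoopEnd text (j + 1) d b (by omega)
    rw [pvLoopU text j depth instr hjn]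
    split_ifs with h1 h2 h3 h4 h5 h6 h7
    · exact hE _ _
    · exact hE _ _
    · exact hE _ _
    · exact hE _ _
    · exact absurd h5.2.1 hj1
    · exact absurd h6.2.1 hj1
    · exact absurd h7.2.1 hj1
    · exact hE _ _
  · exact pvLoopEnd text j depth instr (by omega)

-- the machine in BLOCK mode = A's inner comment loop followed by A's continuation
theorem pvBlockSim (text : List Char) (k : Nat) : ∀ j depth nest prev, text.length - j ≤ k →
    1 ≤ nest →
    pvFtaSM (text.drop j) j .blok depth nest none prev =
      (if (pvBlock text (text.length + 1) j nest).2 = 0 then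
        pvFtaSM (text.drop (pvBlock text (text.length + 1) j nest).1)
          (pvBlock text (text.length + 1) j nest).1 .norm depth 0 none
          (pvPrevOf text (pvBlock text (text.length + 1) j nest).1)
       else -1) := by
  induction k with
  | zero =>
    intro j d nest prev hk hn
    have hj : text.length ≤ j := by omega
    have hbl : pvBlock text (text.length + 1) j nest = (j, nest) :=
      pvBlock_exit text j nest (by omega)
    rw [hbl, if_neg (show nest ≠ 0 by omega), List.drop_eq_nil_of_le hj]
    rfl
  | succ k ih =>
    intro j d nest prev hk hn
    by_cases hj1 : j < text.length - 1
    case neg =>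
      have hbl : pvBlock text (text.length + 1) j nest = (j, nest) :=
        pvBlock_exit text j nest (fun hh => hj1 hh.1)
      rw [hbl, if_neg (show nest ≠ 0 by omega)]
      by_cases hj : j < text.length
      · rw [pvDropCons hj]
        simp only [pvFtaSM]
        rw [if_neg (by simp), if_neg (by simp), List.drop_eq_nil_of_le (by omega)]
        rfl
      · rw [List.drop_eq_nil_of_le (by omega)]
        rfl
    case pos =>
      have hj : j < text.length := by omega
      have hj2 : j + 1 < text.length := by omega
      have hstep : text.length - (j + 2) ≤ k := by omega
      have hrest : text.drop (j + 1) = text.getD (j + 1) ' ' :: text.drop (j + 2) :=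
        pvDropCons hj2
      rw [pvDropCons hj, hrest]
      by_cases hp : text.getD j ' ' = '/' ∧ text.getD (j + 1) ' ' = '-'
      · have hbl : pvBlock text (text.length + 1) j nest = pvBlock text (text.length + 1) (j + 2) (nest + 1) :=
          pvBlock_inc text j nest ⟨hj1, by omega⟩ hp
        obtain ⟨hc1, hc2⟩ := hp
        rw [hbl, hc1, hc2]
        have e1 : pvFtaSM ('/' :: '-' :: text.drop (j + 2)) j PvMode.blok d nest none prev
            = pvFtaSM (text.drop (j + 2)) (j + 2) PvMode.blok d (nest + 1) none (some '-') := by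
          simp [pvFtaSM]
        rw [e1]
        exact ih (j + 2) d (nest + 1) (some '-') hstep (by omega)
      · by_cases hm : text.getD j ' ' = '-' ∧ text.getD (j + 1) ' ' = '/'
        · have hbl : pvBlock text (text.length + 1) j nest = pvBlock text (text.length + 1) (j + 2) (nest - 1) :=
            pvBlock_dec text j nest ⟨hj1, by omega⟩ hp hm
          obtain ⟨hc1, hc2⟩ := hm
          rw [hbl, hc1, hc2]
          have e1 : pvFtaSM ('-' :: '/' :: text.drop (j + 2)) j PvMode.blok d nest none prev
              = (if nest - 1 = 0 then pvFtaSM (text.drop (j + 2)) (j + 2) PvMode.norm d (nest - 1) none (some '/')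
                 else pvFtaSM (text.drop (j + 2)) (j + 2) PvMode.blok d (nest - 1) none (some '/')) := by
            simp [pvFtaSM]
          rw [e1]
          by_cases hn1 : nest - 1 = 0
          · have hbl2 : pvBlock text (text.length + 1) (j + 2) (nest - 1) = (j + 2, nest - 1) :=
              pvBlock_exit text (j + 2) (nest - 1) (by omega)
            rw [if_pos hn1, hbl2, if_pos (show ((j + 2, nest - 1) : ℕ × ℕ).2 = 0 from hn1)]
            have hpv : pvPrevOf text (j + 2) = some '/' := by
              rw [show j + 2 = j + 1 + 1 from rfl, pvPrevOf_succ, hc2]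
            rw [hn1]
            exact congrArg _ hpv.symm
          · rw [if_neg hn1]
            exact ih (j + 2) d (nest - 1) (some '/') hstep (by omega)
        · have hbl : pvBlock text (text.length + 1) j nest = pvBlock text (text.length + 1) (j + 1) nest :=
            pvBlock_skip text j nest ⟨hj1, by omega⟩ hp hm
          rw [hbl]
          -- no pair at j: A moves one char; the machine may set a pending char that cannot fire
          by_cases hc7 : text.getD j ' ' = '/'
          · have hne : text.getD (j + 1) ' ' ≠ '-' := fun hh => hp ⟨hc7, hh⟩
            rw [hc7]
            have e1 : pvFtaSM ('/' :: text.getD (j + 1) ' ' :: text.drop (j + 2)) j PvMode.blok d nest none prev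
                = pvFtaSM (text.getD (j + 1) ' ' :: text.drop (j + 2)) (j + 1) PvMode.blok d nest (some '/') (some '/') := by
              simp [pvFtaSM]
            rw [e1, show text.getD (j + 1) ' ' :: text.drop (j + 2) = text.drop (j + 1) from hrest.symm]
            rw [pvCollapseBlok _ _ _ _ _ _ (by
              intro c2 rest2 hcr
              rw [hrest] at hcr
              injection hcr with hcr1 _
              subst hcr1
              exact ⟨fun hh => hne hh.2, by simp⟩)]
            exact ih (j + 1) d nest (some '/') (by omega) hn
          · by_cases hc8 : text.getD j ' ' = '-'
            · have hne : text.getD (j + 1) ' ' ≠ '/' := fun hh => hm ⟨hc8, hh⟩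
              rw [hc8]
              have e1 : pvFtaSM ('-' :: text.getD (j + 1) ' ' :: text.drop (j + 2)) j PvMode.blok d nest none prev
                  = pvFtaSM (text.getD (j + 1) ' ' :: text.drop (j + 2)) (j + 1) PvMode.blok d nest (some '-') (some '-') := by
                simp [pvFtaSM]
              rw [e1, show text.getD (j + 1) ' ' :: text.drop (j + 2) = text.drop (j + 1) from hrest.symm]
              rw [pvCollapseBlok _ _ _ _ _ _ (by
                intro c2 rest2 hcr
                rw [hrest] at hcr
                injection hcr with hcr1 _
                subst hcr1
                exact ⟨by simp, fun hh => hne hh.2⟩)]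
              exact ih (j + 1) d nest (some '-') (by omega) hn
            · have e1 : pvFtaSM (text.getD j ' ' :: text.getD (j + 1) ' ' :: text.drop (j + 2)) j PvMode.blok d nest none prev
                  = pvFtaSM (text.getD (j + 1) ' ' :: text.drop (j + 2)) (j + 1) PvMode.blok d nest none (some (text.getD j ' ')) := by
                simp only [pvFtaSM]
                rw [if_neg (by simp), if_neg (by simp),
                  if_neg (show ¬ (text.getD j ' ' = '/' ∨ text.getD j ' ' = '-') by tauto)]
              rw [e1, show text.getD (j + 1) ' ' :: text.drop (j + 2) = text.drop (j + 1) from hrest.symm]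
              exact ih (j + 1) d nest (some (text.getD j ' ')) (by omega) hn

theorem pvQuoteIff (text : List Char) (i : Nat) :
    (i = 0 ∨ text.getD (i - 1) ' ' ≠ '\\') ↔ pvPrevOf text i ≠ some '\\' := by
  by_cases h0 : i = 0 <;> simp [pvPrevOf, h0]

theorem pvMain (text : List Char) (k : Nat) : ∀ i depth nest instr, text.length - i ≤ k →
    pvFtaLoop text (text.length + 1) i depth instr =
      pvFtaSM (text.drop i) i (if instr then PvMode.str else PvMode.norm) depth nest none
        (pvPrevOf text i) := by
  induction k with
  | zero =>
    intro i d nest instr hk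
    rw [pvLoopEnd text i d instr (by omega), List.drop_eq_nil_of_le (by omega)]
    cases instr <;> rfl
  | succ k ih =>
    intro i d nest instr hk
    by_cases hi : i < text.length
    case neg =>
      rw [pvLoopEnd text i d instr (by omega), List.drop_eq_nil_of_le (by omega)]
      cases instr <;> rfl
    case pos =>
      have hpv1 : pvPrevOf text (i + 1) = some (text.getD i ' ') := pvPrevOf_succ text i
      rw [pvDropCons hi, pvLoopU text i d instr hi]
      by_cases hq : text.getD i ' ' = '"' ∧ (i = 0 ∨ text.getD (i - 1) ' ' ≠ '\\')
      · -- quote toggle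
        have hq2 : pvPrevOf text i ≠ some '\\' := (pvQuoteIff text i).mp hq.2
        rw [if_pos hq]
        have hqB2 : text.getD i ' ' = '"' ∧ pvPrevOf text i ≠ some '\\' := ⟨hq.1, hq2⟩
        cases instr
        · simp only [Bool.not_false]
          rw [ih (i + 1) d nest true (by omega), hpv1]
          simp only [pvFtaSM, Bool.false_eq_true, if_false, if_true]
          rw [if_pos hqB2]
        · simp only [Bool.not_true]
          rw [ih (i + 1) d nest false (by omega), hpv1]
          simp only [pvFtaSM, Bool.false_eq_true, if_false, if_true]
          rw [if_pos hqB2]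
      · -- no quote toggle
        have hqB : ¬ (text.getD i ' ' = '"' ∧ pvPrevOf text i ≠ some '\\') :=
          fun hh => hq ⟨hh.1, (pvQuoteIff text i).mpr hh.2⟩
        rw [if_neg hq]
        cases instr
        case neg.true =>
          -- inside a string, not a closing quote: both just move on
          rw [if_pos rfl, ih (i + 1) d nest true (by omega), hpv1]
          simp only [if_true]
          simp only [pvFtaSM]
          rw [if_neg hqB]
        case neg.false =>
          rw [if_neg (by simp)]
          simp only [Bool.false_eq_true, if_false]
          by_cases ho : text.getD i ' ' = '(' ∨ text.getD i ' ' = '[' ∨ text.getD i ' ' = '{'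
          · rw [if_pos ho, ih (i + 1) (d + 1) nest false (by omega), hpv1]
            rcases ho with h | h | h <;> rw [h] <;> simp [pvFtaSM]
          · rw [if_neg ho]
            by_cases hcl : text.getD i ' ' = ')' ∨ text.getD i ' ' = ']' ∨ text.getD i ' ' = '}'
            · rw [if_pos hcl, ih (i + 1) (d - 1) nest false (by omega), hpv1]
              rcases hcl with h | h | h <;> rw [h] <;> simp [pvFtaSM]
            · rw [if_neg hcl]
              by_cases hc : text.getD i ' ' = ':'
              · by_cases hf : i + 1 < text.length ∧ text.getD (i + 1) ' ' = '=' ∧ d = 0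
                · -- top-level ':=' found
                  rw [if_pos ⟨hc, hf.1, hf.2.1, hf.2.2⟩, hc, pvDropCons hf.1, hf.2.1, hf.2.2]
                  simp [pvFtaSM]
                · rw [if_neg (fun hh => hf hh.2),
                    if_neg (show ¬ (text.getD i ' ' = '-' ∧ i + 1 < text.length ∧ text.getD (i + 1) ' ' = '-') by rw [hc]; simp),
                    if_neg (show ¬ (text.getD i ' ' = '/' ∧ i + 1 < text.length ∧ text.getD (i + 1) ' ' = '-') by rw [hc]; simp)]
                  rw [hc]
                  have e1 : pvFtaSM (':' :: text.drop (i + 1)) i PvMode.norm d nest none (pvPrevOf text i)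
                      = pvFtaSM (text.drop (i + 1)) (i + 1) PvMode.norm d nest (some ':') (some ':') := by
                    simp [pvFtaSM]
                  rw [e1]
                  by_cases hend : i + 1 < text.length
                  · rw [pvCollapseNorm _ _ _ _ _ _ (by
                      intro c2 rest2 hcr
                      rw [pvDropCons hend] at hcr
                      injection hcr with h1 _
                      subst h1
                      refine ⟨?_, by simp, by simp⟩
                      rintro ⟨-, he, hd0⟩
                      exact hf ⟨hend, he, hd0⟩)]
                    rw [ih (i + 1) d nest false (by omega), hpv1, hc]
                    simp only [Bool.false_eq_true, if_false]
                  · rw [List.drop_eq_nil_of_le (by omega), pvLoopEnd text (i + 1) d false (by omega)]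
                    rfl
              · by_cases hdsh : text.getD i ' ' = '-'
                · by_cases hf : i + 1 < text.length ∧ text.getD (i + 1) ' ' = '-'
                  · -- '--' line comment
                    rw [if_neg (fun hh => hc hh.1), if_pos ⟨hdsh, hf.1, hf.2⟩]
                    rw [pvFindNl_step text i hi (by rw [hdsh]; decide),
                      pvFindNl_step text (i + 1) hf.1 (by rw [hf.2]; decide)]
                    rw [hdsh, pvDropCons hf.1, hf.2]
                    have e1 : pvFtaSM ('-' :: '-' :: text.drop (i + 2)) i PvMode.norm d nest none (pvPrevOf text i)
                        = pvFtaSM (text.drop (i + 2)) (i + 2) PvMode.line d nest none (some '-') := by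
                      simp [pvFtaSM]
                    rw [e1, pvLineSim text text.length (i + 2) d nest (some '-') (by omega)]
                    cases hnl : pvFindNl text (text.length + 1) (i + 2) with
                    | none => rfl
                    | some nl =>
                      obtain ⟨hge, hlt, hchar⟩ := pvFindNl_ge hnl
                      show pvFtaLoop text (text.length + 1) (nl + 1) d false
                          = pvFtaSM (List.drop (nl + 1) text) (nl + 1) PvMode.norm d nest none (some '\n')
                      rw [ih (nl + 1) d nest false (by omega), pvPrevOf_succ, hchar]
                      simp only [Bool.false_eq_true, if_false]
                  · rw [if_neg (fun hh => hc hh.1), if_neg (fun hh => hf hh.2),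
                      if_neg (show ¬ (text.getD i ' ' = '/' ∧ i + 1 < text.length ∧ text.getD (i + 1) ' ' = '-') by rw [hdsh]; simp)]
                    rw [hdsh]
                    have e1 : pvFtaSM ('-' :: text.drop (i + 1)) i PvMode.norm d nest none (pvPrevOf text i)
                        = pvFtaSM (text.drop (i + 1)) (i + 1) PvMode.norm d nest (some '-') (some '-') := by
                      simp [pvFtaSM]
                    rw [e1]
                    by_cases hend : i + 1 < text.length
                    · rw [pvCollapseNorm _ _ _ _ _ _ (by
                        intro c2 rest2 hcr
                        rw [pvDropCons hend] at hcr
                        injection hcr with h1 _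
                        subst h1
                        refine ⟨by simp, ?_, by simp⟩
                        rintro ⟨-, h2⟩
                        exact hf ⟨hend, h2⟩)]
                      rw [ih (i + 1) d nest false (by omega), hpv1, hdsh]
                      simp only [Bool.false_eq_true, if_false]
                    · rw [List.drop_eq_nil_of_le (by omega), pvLoopEnd text (i + 1) d false (by omega)]
                      rfl
                · by_cases hsl : text.getD i ' ' = '/'
                  · by_cases hf : i + 1 < text.length ∧ text.getD (i + 1) ' ' = '-'
                    · -- '/-' block comment
                      rw [if_neg (fun hh => hc hh.1), if_neg (fun hh => hdsh hh.1), if_pos ⟨hsl, hf.1, hf.2⟩]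
                      rw [hsl, pvDropCons hf.1, hf.2]
                      have e1 : pvFtaSM ('/' :: '-' :: text.drop (i + 2)) i PvMode.norm d nest none (pvPrevOf text i)
                          = pvFtaSM (text.drop (i + 2)) (i + 2) PvMode.blok d 1 none (some '-') := by
                        simp [pvFtaSM]
                      rw [e1, pvBlockSim text text.length (i + 2) d 1 (some '-') (by omega) (le_refl 1)]
                      have hge := pvBlock_ge text (text.length + 1) (i + 2) 1
                      by_cases hcd : (pvBlock text (text.length + 1) (i + 2) 1).2 = 0
                      · rw [if_pos hcd, ih (pvBlock text (text.length + 1) (i + 2) 1).1 d 0 false (by omega)]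
                        simp only [Bool.false_eq_true, if_false]
                      · rw [if_neg hcd,
                          pvLast text (pvBlock text (text.length + 1) (i + 2) 1).1 d false
                            (pvBlockExit text (text.length + 1) (i + 2) 1 (by omega) hcd)]
                    · rw [if_neg (fun hh => hc hh.1), if_neg (fun hh => hdsh hh.1), if_neg (fun hh => hf hh.2)]
                      rw [hsl]
                      have e1 : pvFtaSM ('/' :: text.drop (i + 1)) i PvMode.norm d nest none (pvPrevOf text i)
                          = pvFtaSM (text.drop (i + 1)) (i + 1) PvMode.norm d nest (some '/') (some '/') := by
                        simp [pvFtaSM]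
                      rw [e1]
                      by_cases hend : i + 1 < text.length
                      · rw [pvCollapseNorm _ _ _ _ _ _ (by
                          intro c2 rest2 hcr
                          rw [pvDropCons hend] at hcr
                          injection hcr with h1 _
                          subst h1
                          refine ⟨by simp, by simp, ?_⟩
                          rintro ⟨-, h2⟩
                          exact hf ⟨hend, h2⟩)]
                        rw [ih (i + 1) d nest false (by omega), hpv1, hsl]
                        simp only [Bool.false_eq_true, if_false]
                      · rw [List.drop_eq_nil_of_le (by omega), pvLoopEnd text (i + 1) d false (by omega)]
                        rfl
                  · -- ordinary character
                    rw [if_neg (fun hh => hc hh.1), if_neg (fun hh => hdsh hh.1), if_neg (fun hh => hsl hh.1)]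
                    have e1 : pvFtaSM (text.getD i ' ' :: text.drop (i + 1)) i PvMode.norm d nest none (pvPrevOf text i)
                        = pvFtaSM (text.drop (i + 1)) (i + 1) PvMode.norm d nest none (some (text.getD i ' ')) := by
                      simp only [pvFtaSM]
                      rw [if_neg hqB, if_neg (by simp), if_neg (by simp), if_neg (by simp),
                        if_neg ho, if_neg hcl,
                        if_neg (show ¬ (text.getD i ' ' = ':' ∨ text.getD i ' ' = '-' ∨ text.getD i ' ' = '/') by tauto)]
                    rw [e1, ih (i + 1) d nest false (by omega), hpv1]
                    simp only [Bool.false_eq_true, if_false]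


theorem pvFtaEq (text : List Char) : find_toplevel_assign text = find_toplevel_assign_alt text := by
  have := pvMain text text.length 0 0 0 false (by omega)
  simpa [find_toplevel_assign, find_toplevel_assign_alt, pvPrevOf] using this

-- ===== VERDICT (by name: the statement is the Claim_ definition above) =====
theorem strip_proof_spec : Claim_equal_strip_proof := by
  intro block_lines _
  unfold Spec_strip_proof strip_proof strip_proof_alt
  simp only [pvFtaEq]
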